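-- pv_equiv track=rewrite | github.com/DaniYuna99/Programacion2022-2023 | Python_proyectos_Parte2/bol8_ProgramacionModular_1/ejercicio14.py | devolverListaConCadenasMasLargas
-- ===== SOURCE A (Python) =====
-- def devolverListaConCadenasMasLargas (lista) :
--
--     mayorNumeroCaracteres = 0
--     caracteresPalabra = 0
--     listaPalabrasLargas = []
--
--
--     for elementoLista in lista:
--
--         for caracter in elementoLista:
--
--             if (caracter.isalpha()):
--                 caracteresPalabra += 1
--
--
--         if (caracteresPalabra > mayorNumeroCaracteres):
--
--             listaPalabrasLargas = []
--             listaPalabrasLargas.append(elementoLista)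
--             mayorNumeroCaracteres = caracteresPalabra
--
--
--         elif (caracteresPalabra == mayorNumeroCaracteres):
--
--             listaPalabrasLargas.append(elementoLista)
--
--
--         caracteresPalabra = 0
--
--
--     return (listaPalabrasLargas)
-- ===== SOURCE B (Python) =====
-- def devolverListaConCadenasMasLargas(lista):
--     counts = [sum(c.isalpha() for c in s) for s in lista]
--     m = max(counts, default=0)
--     return [s for s, c in zip(lista, counts) if c == m]
-- ===== Notes on version B (the rewrite author's own statement) =====
-- stated objective: simpler
-- what changed: Replaces A's single running-max pass with reset-on-new-max accumulator by a two-phase structure: compute all alphabetic-character counts into a list, take max(counts, default=0), then filter the strings whose count equals it.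
import Mathlib
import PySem

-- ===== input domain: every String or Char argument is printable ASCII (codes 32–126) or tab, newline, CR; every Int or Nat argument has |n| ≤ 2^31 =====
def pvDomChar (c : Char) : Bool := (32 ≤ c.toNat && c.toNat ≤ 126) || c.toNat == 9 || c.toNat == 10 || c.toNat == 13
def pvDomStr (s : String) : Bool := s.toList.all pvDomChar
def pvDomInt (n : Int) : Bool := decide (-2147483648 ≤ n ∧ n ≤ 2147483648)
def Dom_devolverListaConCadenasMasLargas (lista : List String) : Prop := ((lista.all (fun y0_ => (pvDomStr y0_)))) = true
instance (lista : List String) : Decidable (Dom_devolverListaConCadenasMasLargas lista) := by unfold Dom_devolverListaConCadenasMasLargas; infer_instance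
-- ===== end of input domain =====

-- B replaces A's single running-max/reset accumulation pass by a two-phase
-- measure-all-then-select structure (count list, max with default 0, filter); simpler, same O(total chars) cost.

-- ===== PORT A =====
-- inner 'for caracter in elementoLista: if caracter.isalpha(): caracteresPalabra += 1'
def pvCntA (s : String) : Int :=
  s.toList.foldl (fun acc c => if PySem.Chars.isalpha c then acc + 1 else acc) 0

def devolverListaConCadenasMasLargas (lista : List String) : List String :=
  (lista.foldl (fun st elementoLista =>
      let caracteresPalabra := pvCntA elementoLista
      if caracteresPalabra > st.1 then (caracteresPalabra, [elementoLista])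
      else if caracteresPalabra = st.1 then (st.1, st.2 ++ [elementoLista])
      else st)
    ((0 : Int), ([] : List String))).2

-- ===== PORT B =====
-- sum(c.isalpha() for c in s)
def pvCntB (s : String) : Int :=
  s.toList.foldl (fun acc c => acc + (if PySem.Chars.isalpha c then 1 else 0)) 0

def devolverListaConCadenasMasLargas_alt (lista : List String) : List String :=
  let counts := lista.map pvCntB
  let m := match PySem.List.max? counts (fun x => x) with
           | some v => v
           | none => 0
  ((lista.zip counts).filter (fun p => p.2 == m)).map (fun p => p.1)

-- ===== PRECONDITION & SPEC =====
def Spec_devolverListaConCadenasMasLargas (lista : List String) (out : List String) : Prop := out = devolverListaConCadenasMasLargas_alt lista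
instance (lista : List String) (out : List String) : Decidable (Spec_devolverListaConCadenasMasLargas lista out) := by unfold Spec_devolverListaConCadenasMasLargas; infer_instance

-- ===== CLAIM (what is proved, stated in full; the proofs are below) =====
def Claim_equal_devolverListaConCadenasMasLargas : Prop := ∀ (lista : List String), Dom_devolverListaConCadenasMasLargas lista → Spec_devolverListaConCadenasMasLargas lista (devolverListaConCadenasMasLargas lista)

-- ===== LEMMAS AND PROOFS =====

theorem cntB_eq_cntA (s : String) : pvCntB s = pvCntA s := by
  unfold pvCntA pvCntB
  congr 1
  funext a c
  by_cases h : PySem.Chars.isalpha c <;> simp [h]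

theorem cntA_nonneg_aux (l : List Char) (a : Int) (ha : 0 ≤ a) :
    0 ≤ l.foldl (fun acc c => if PySem.Chars.isalpha c then acc + 1 else acc) a := by
  induction l generalizing a with
  | nil => exact ha
  | cons c t ih =>
      simp only [List.foldl]
      by_cases h : PySem.Chars.isalpha c <;> simp only [h, if_true] <;>
        exact ih _ (by omega)

theorem cntA_nonneg (s : String) : 0 ≤ pvCntA s :=
  cntA_nonneg_aux s.toList 0 le_rfl

theorem le_foldl_maxf (t : List String) (m : Int) :
    m ≤ t.foldl (fun a e => max a (pvCntA e)) m := by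
  induction t generalizing m with
  | nil => exact le_rfl
  | cons s r ih =>
      simp only [List.foldl]
      exact le_trans (le_max_left _ _) (ih _)

theorem loopA_char (l : List String) (m : Int) (acc : List String) (hm : 0 ≤ m) :
    l.foldl (fun st e =>
      let c := pvCntA e
      if c > st.1 then (c, [e])
      else if c = st.1 then (st.1, st.2 ++ [e])
      else st) (m, acc)
    = (l.foldl (fun a e => max a (pvCntA e)) m,
       (if l.foldl (fun a e => max a (pvCntA e)) m = m then acc else [])
         ++ l.filter (fun e => pvCntA e == l.foldl (fun a e => max a (pvCntA e)) m)) := by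
  induction l generalizing m acc with
  | nil => simp
  | cons s t ih =>
      simp only [List.foldl_cons, List.filter_cons]
      by_cases hgt : pvCntA s > m
      · have hmax : max m (pvCntA s) = pvCntA s := max_eq_right (le_of_lt hgt)
        rw [if_pos hgt]
        simp only [hmax]
        rw [ih (pvCntA s) [s] (le_trans hm (le_of_lt hgt))]
        have hMt := le_foldl_maxf t (pvCntA s)
        have hne : t.foldl (fun a e => max a (pvCntA e)) (pvCntA s) ≠ m := by omega
        rw [if_neg hne]
        by_cases hc : pvCntA s = t.foldl (fun a e => max a (pvCntA e)) (pvCntA s)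
        · rw [if_pos (beq_iff_eq.mpr hc), if_pos hc.symm]; simp
        · rw [if_neg (fun h => hc (beq_iff_eq.mp h)), if_neg (fun h => hc h.symm)]
      · by_cases heq : pvCntA s = m
        · have hmax : max m (pvCntA s) = m := max_eq_left (le_of_eq heq)
          rw [if_neg hgt, if_pos heq]
          simp only [hmax]
          rw [ih m (acc ++ [s]) hm]
          by_cases hMm : t.foldl (fun a e => max a (pvCntA e)) m = m
          · rw [if_pos hMm, if_pos hMm, if_pos (beq_iff_eq.mpr (heq.trans hMm.symm))]
            simp
          · rw [if_neg hMm, if_neg hMm,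
                if_neg (fun h : (pvCntA s == t.foldl (fun a e => max a (pvCntA e)) m) = true =>
                  hMm (heq ▸ beq_iff_eq.mp h).symm)]
        · have hlt : pvCntA s < m := lt_of_le_of_ne (not_lt.mp hgt) heq
          rw [if_neg hgt, if_neg heq, ih m acc hm]
          have hMt := le_foldl_maxf t m
          have hmax : max m (pvCntA s) = m := max_eq_left (le_of_lt hlt)
          simp only [hmax]
          have hcne : ¬ ((pvCntA s == t.foldl (fun a e => max a (pvCntA e)) m) = true) :=
            fun h => by have := beq_iff_eq.mp h; omega
          rw [if_neg hcne]

theorem zip_filter_map (l : List String) (f : String → Int) (m : Int) :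
    ((l.zip (l.map f)).filter (fun p => p.2 == m)).map (fun p => p.1)
      = l.filter (fun e => f e == m) := by
  induction l with
  | nil => rfl
  | cons x t ih =>
      simp only [List.map, List.zip_cons_cons, List.filter]
      by_cases h : f x == m <;> simp [h, ih]

theorem max_getD_eq_foldl (l : List Int) (h : ∀ x ∈ l, 0 ≤ x) :
    (match PySem.List.max? l (fun x => x) with | some v => v | none => 0)
      = l.foldl (fun a x => max a x) 0 := by
  cases l with
  | nil => rfl
  | cons x t =>
      rw [PySem.List.max?_id_cons]
      simp only [List.foldl]
      rw [max_eq_right (h x (List.mem_cons_self))]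

-- ===== VERDICT (by name: the statement is the Claim_ definition above) =====
theorem devolverListaConCadenasMasLargas_spec : Claim_equal_devolverListaConCadenasMasLargas := by
  intro lista _
  unfold Spec_devolverListaConCadenasMasLargas devolverListaConCadenasMasLargas devolverListaConCadenasMasLargas_alt
  have hpos : ∀ x ∈ lista.map pvCntB, (0:Int) ≤ x := by
    intro x hx
    rcases List.mem_map.mp hx with ⟨s, -, rfl⟩
    rw [cntB_eq_cntA]; exact cntA_nonneg s
  rw [loopA_char lista 0 [] le_rfl, zip_filter_map, max_getD_eq_foldl _ hpos,
      List.foldl_map]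
  simp only [cntB_eq_cntA]
  split <;> simp
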